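-- pv_equiv track=rewrite | github.com/Amol-079/zerofalse_final | backend/services/detection_engine.py | _infer_threat_type
-- ===== SOURCE A (Python) =====
-- def _infer_threat_type(pattern_id: str) -> str:
--     prefix_map = {
--         "PI": "prompt_injection",
--         "SH": "shell_execution",
--         "CE": "code_execution",
--         "SQL": "sql_injection",
--         "NOSQL": "nosql_injection",
--         "PT": "path_traversal",
--         "SSRF": "ssrf",
--         "SSTI": "template_injection",
--         "CR": "credential_exposure",
--         "DNS": "dns_exfiltration",
--         "EX": "data_exfiltration",
--         "ENTROPY": "obfuscation",
--         "TN": "high_risk_tool",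
--         "SEM": "prompt_injection",
--         "CHAIN": "attack_chain",
--         "STRUCT": "structural_injection",
--     }
--     for pfx, ttype in prefix_map.items():
--         if pattern_id.startswith(pfx):
--             return ttype
--     return "unknown"
-- ===== SOURCE B (Python) =====
-- _PREFIX_MAP = {
--     "PI": "prompt_injection",
--     "SH": "shell_execution",
--     "CE": "code_execution",
--     "SQL": "sql_injection",
--     "NOSQL": "nosql_injection",
--     "PT": "path_traversal",
--     "SSRF": "ssrf",
--     "SSTI": "template_injection",
--     "CR": "credential_exposure",
--     "DNS": "dns_exfiltration",
--     "EX": "data_exfiltration",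
--     "ENTROPY": "obfuscation",
--     "TN": "high_risk_tool",
--     "SEM": "prompt_injection",
--     "CHAIN": "attack_chain",
--     "STRUCT": "structural_injection",
-- }
--
-- # No key of _PREFIX_MAP is a prefix of another, so at most one prefix can match:
-- # try the distinct key lengths and look the slice up directly in the dict.
-- _LENGTHS = sorted({len(k) for k in _PREFIX_MAP})
--
--
-- def _infer_threat_type(pattern_id: str) -> str:
--     for n in _LENGTHS:
--         ttype = _PREFIX_MAP.get(pattern_id[:n])
--         if ttype is not None:
--             return ttype
--     return "unknown"
-- ===== Notes on version B (the rewrite author's own statement) =====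
-- stated objective: alternative
-- what changed: Instead of scanning all 16 prefixes with startswith, B precomputes the sorted set of distinct key lengths and does one hashed dict lookup of pattern_id[:n] per candidate length (correct because the key set is prefix-free, so at most one prefix matches).
import Mathlib
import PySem

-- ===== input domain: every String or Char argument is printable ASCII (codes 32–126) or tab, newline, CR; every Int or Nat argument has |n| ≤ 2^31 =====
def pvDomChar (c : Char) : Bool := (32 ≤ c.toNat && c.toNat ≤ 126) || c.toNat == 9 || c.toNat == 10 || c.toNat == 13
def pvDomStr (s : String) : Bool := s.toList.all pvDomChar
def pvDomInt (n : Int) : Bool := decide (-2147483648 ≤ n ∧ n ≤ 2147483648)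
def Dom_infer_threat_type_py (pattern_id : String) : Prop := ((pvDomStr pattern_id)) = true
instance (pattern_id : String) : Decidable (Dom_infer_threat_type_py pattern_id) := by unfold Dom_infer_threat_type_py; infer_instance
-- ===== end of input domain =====

-- B replaces the linear startswith-scan over all 16 prefixes by a hashed dict lookup of
-- pattern_id[:n] for each distinct key length n (valid because the key set is prefix-free).

-- ===== PORT A =====
-- the for-loop over prefix_map.items()
def aLoop (s : String) : List (String × String) → String
  | [] => "unknown"
  | (pfx, ttype) :: rest => if PySem.Str.startswith s pfx then ttype else aLoop s rest

def infer_threat_type_py (pattern_id : String) : String :=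
  let prefix_map : PySem.Dict String String := PySem.Dict.ofList
    [("PI", "prompt_injection"), ("SH", "shell_execution"), ("CE", "code_execution"),
     ("SQL", "sql_injection"), ("NOSQL", "nosql_injection"), ("PT", "path_traversal"),
     ("SSRF", "ssrf"), ("SSTI", "template_injection"), ("CR", "credential_exposure"),
     ("DNS", "dns_exfiltration"), ("EX", "data_exfiltration"), ("ENTROPY", "obfuscation"),
     ("TN", "high_risk_tool"), ("SEM", "prompt_injection"), ("CHAIN", "attack_chain"),
     ("STRUCT", "structural_injection")]
  aLoop pattern_id prefix_map.items

-- ===== PORT B =====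
def bPrefixMap : PySem.Dict String String := PySem.Dict.ofList
    [("PI", "prompt_injection"), ("SH", "shell_execution"), ("CE", "code_execution"),
     ("SQL", "sql_injection"), ("NOSQL", "nosql_injection"), ("PT", "path_traversal"),
     ("SSRF", "ssrf"), ("SSTI", "template_injection"), ("CR", "credential_exposure"),
     ("DNS", "dns_exfiltration"), ("EX", "data_exfiltration"), ("ENTROPY", "obfuscation"),
     ("TN", "high_risk_tool"), ("SEM", "prompt_injection"), ("CHAIN", "attack_chain"),
     ("STRUCT", "structural_injection")]

-- _LENGTHS = sorted({len(k) for k in _PREFIX_MAP})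
def bLengths : List Int :=
  PySem.List.sorted (PySem.Set.ofList (bPrefixMap.keys.map (fun k => (PySem.Str.len k : Int))))
    (fun x => x) false

-- the for-loop over _LENGTHS
def bLoop (s : String) : List Int → String
  | [] => "unknown"
  | n :: rest =>
      match bPrefixMap.get? (PySem.Str.slice s none (some n)) with
      | some ttype => ttype
      | none => bLoop s rest

def infer_threat_type_py_alt (pattern_id : String) : String :=
  bLoop pattern_id bLengths

-- ===== PRECONDITION & SPEC =====
def Spec_infer_threat_type_py (pattern_id : String) (out : String) : Prop := out = infer_threat_type_py_alt pattern_id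
instance (pattern_id : String) (out : String) : Decidable (Spec_infer_threat_type_py pattern_id out) := by unfold Spec_infer_threat_type_py; infer_instance

-- ===== CLAIM (what is proved, stated in full; the proofs are below) =====
def Claim_equal_infer_threat_type_py : Prop := ∀ (pattern_id : String), Dom_infer_threat_type_py pattern_id → Spec_infer_threat_type_py pattern_id (infer_threat_type_py pattern_id)

-- ===== LEMMAS AND PROOFS =====

-- the items of the prefix map, as a plain list (both dicts have these items)
def pvItems : List (String × String) :=
    [("PI", "prompt_injection"), ("SH", "shell_execution"), ("CE", "code_execution"),
     ("SQL", "sql_injection"), ("NOSQL", "nosql_injection"), ("PT", "path_traversal"),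
     ("SSRF", "ssrf"), ("SSTI", "template_injection"), ("CR", "credential_exposure"),
     ("DNS", "dns_exfiltration"), ("EX", "data_exfiltration"), ("ENTROPY", "obfuscation"),
     ("TN", "high_risk_tool"), ("SEM", "prompt_injection"), ("CHAIN", "attack_chain"),
     ("STRUCT", "structural_injection")]

theorem hA (s : String) : infer_threat_type_py s = aLoop s pvItems := rfl

theorem hItems : bPrefixMap.items = pvItems := by decide

theorem hKeysNodup : bPrefixMap.keys.Nodup := by decide

theorem hLengths : bLengths = [2, 3, 4, 5, 6, 7] := by decide

theorem hLen : ∀ p ∈ pvItems, (p.1.toList.length : Int) ∈ ([2, 3, 4, 5, 6, 7] : List Int) := by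
  decide

-- the 16 prefixes are pairwise prefix-free
theorem hFree : ∀ p ∈ pvItems, ∀ q ∈ pvItems, p.1 ≠ q.1 → ¬ p.1.toList <+: q.1.toList := by
  decide

theorem hMapNodup : (pvItems.map Prod.fst).Nodup := by decide

-- two matching prefixes must be the same entry
theorem uniq_entry {l : List Char} {p q : String × String} (hp : p ∈ pvItems) (hq : q ∈ pvItems)
    (h1 : p.1.toList <+: l) (h2 : q.1.toList <+: l) : p = q := by
  have hk : p.1 = q.1 := by
    by_contra hne
    rcases List.prefix_or_prefix_of_prefix h1 h2 with h | h
    · exact hFree p hp q hq hne h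
    · exact hFree q hq p hp (fun e => hne e.symm) h
  have := List.inj_on_of_nodup_map hMapNodup
  exact this hp hq hk

theorem toList_eq_of_eq {a b : String} (h : a.toList = b.toList) : a = b :=
  String.toList_inj.mp h

theorem slice_toList (s : String) (n : Int) (hn : 0 ≤ n) :
    (PySem.Str.slice s none (some n)).toList = s.toList.take n.toNat := by
  simp [PySem.Str.toList_slice]
  rw [PySem.List.slice_to _ hn]

-- A's loop when no prefix matches
theorem aLoop_none (s : String) (items : List (String × String))
    (h : ∀ p ∈ items, ¬ p.1.toList <+: s.toList) : aLoop s items = "unknown" := by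
  induction items with
  | nil => rfl
  | cons p rest ih =>
    obtain ⟨pfx, t⟩ := p
    have hp := h (pfx, t) (List.mem_cons_self ..)
    have hb : PySem.Str.startswith s pfx = false := by
      rw [PySem.Str.startswith_eq]
      exact Bool.eq_false_iff.mpr (fun hc => hp ((PySem.Chars.startswith_iff _ _).mp hc))
    simp only [aLoop, hb, Bool.false_eq_true, if_false]
    exact ih (fun q hq => h q (List.mem_cons_of_mem _ hq))

-- A's loop when every matching entry carries the value v and some entry matches
theorem aLoop_found (s : String) (v : String) (items : List (String × String))
    (hall : ∀ p ∈ items, p.1.toList <+: s.toList → p.2 = v)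
    (hex : ∃ p ∈ items, p.1.toList <+: s.toList) : aLoop s items = v := by
  induction items with
  | nil => rcases hex with ⟨p, hp, _⟩; cases hp
  | cons p rest ih =>
    obtain ⟨pfx, t⟩ := p
    by_cases hb : PySem.Str.startswith s pfx = true
    · have hpre : pfx.toList <+: s.toList := by
        rw [PySem.Str.startswith_eq] at hb
        exact (PySem.Chars.startswith_iff _ _).mp hb
      have := hall (pfx, t) (List.mem_cons_self ..) hpre
      simp only [aLoop, hb, if_true]
      exact this
    · have hbf : PySem.Str.startswith s pfx = false := Bool.eq_false_iff.mpr hb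
      simp only [aLoop, hbf, Bool.false_eq_true, if_false]
      apply ih
      · exact fun q hq => hall q (List.mem_cons_of_mem _ hq)
      · rcases hex with ⟨q, hq, hqpre⟩
        rcases List.mem_cons.mp hq with rfl | hq'
        · exfalso
          apply hb
          rw [PySem.Str.startswith_eq]
          exact (PySem.Chars.startswith_iff _ _).mpr hqpre
        · exact ⟨q, hq', hqpre⟩

-- B's loop when every lookup misses
theorem bLoop_none (s : String) (Ls : List Int)
    (h : ∀ n ∈ Ls, bPrefixMap.get? (PySem.Str.slice s none (some n)) = none) :
    bLoop s Ls = "unknown" := by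
  induction Ls with
  | nil => rfl
  | cons n rest ih =>
    simp only [bLoop, h n (List.mem_cons_self ..)]
    exact ih (fun m hm => h m (List.mem_cons_of_mem _ hm))

-- B's loop when every hit yields v and some length hits
theorem bLoop_found (s : String) (v : String) (Ls : List Int)
    (hall : ∀ n ∈ Ls, ∀ w, bPrefixMap.get? (PySem.Str.slice s none (some n)) = some w → w = v)
    (hex : ∃ n ∈ Ls, bPrefixMap.get? (PySem.Str.slice s none (some n)) = some v) :
    bLoop s Ls = v := by
  induction Ls with
  | nil => rcases hex with ⟨n, hn, _⟩; cases hn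
  | cons n rest ih =>
    cases hg : bPrefixMap.get? (PySem.Str.slice s none (some n)) with
    | some w =>
      simp only [bLoop, hg]
      exact hall n (List.mem_cons_self ..) w hg
    | none =>
      simp only [bLoop, hg]
      apply ih
      · exact fun m hm w hw => hall m (List.mem_cons_of_mem _ hm) w hw
      · rcases hex with ⟨m, hm, hms⟩
        rcases List.mem_cons.mp hm with rfl | hm'
        · rw [hg] at hms; cases hms
        · exact ⟨m, hm', hms⟩

theorem mem_lengths_nonneg {n : Int} (h : n ∈ ([2, 3, 4, 5, 6, 7] : List Int)) : 0 ≤ n := by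
  simp only [List.mem_cons, List.not_mem_nil, or_false] at h
  rcases h with rfl | rfl | rfl | rfl | rfl | rfl <;> norm_num

-- ===== VERDICT (by name: the statement is the Claim_ definition above) =====
theorem infer_threat_type_py_spec : Claim_equal_infer_threat_type_py := by
  intro s _
  unfold Spec_infer_threat_type_py infer_threat_type_py_alt
  rw [hA, hLengths]
  by_cases hex : ∃ p ∈ pvItems, p.1.toList <+: s.toList
  · rcases hex with ⟨p, hp, hpre⟩
    -- every matching entry is p
    have huniq : ∀ q ∈ pvItems, q.1.toList <+: s.toList → q = p :=
      fun q hq hqpre => uniq_entry hq hp hqpre hpre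
    rw [aLoop_found s p.2 pvItems (fun q hq h => by rw [huniq q hq h]) ⟨p, hp, hpre⟩]
    apply (bLoop_found s p.2 _ _ _).symm
    · intro n hn w hw
      have hmem := PySem.Dict.mem_items_of_get?_eq_some _ hw
      rw [hItems] at hmem
      have hpref : (PySem.Str.slice s none (some n)).toList <+: s.toList := by
        rw [slice_toList s n (mem_lengths_nonneg hn)]
        exact List.take_prefix _ _
      have := huniq _ hmem hpref
      exact congrArg Prod.snd this
    · refine ⟨(p.1.toList.length : Int), hLen p hp, ?_⟩
      have hslice : PySem.Str.slice s none (some (p.1.toList.length : Int)) = p.1 := by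
        apply toList_eq_of_eq
        rw [slice_toList s _ (by positivity)]
        simp only [Int.toNat_natCast]
        exact (List.prefix_iff_eq_take.mp hpre).symm
      rw [hslice]
      have hp' : (p.1, p.2) ∈ bPrefixMap.items := by rw [hItems]; exact hp
      exact PySem.Dict.get?_of_mem_items _ hp' hKeysNodup
  · push Not at hex
    rw [aLoop_none s pvItems hex]
    apply (bLoop_none s _ _).symm
    intro n hn
    cases hg : bPrefixMap.get? (PySem.Str.slice s none (some n)) with
    | none => rfl
    | some w =>
      exfalso
      have hmem := PySem.Dict.mem_items_of_get?_eq_some _ hg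
      rw [hItems] at hmem
      apply hex _ hmem
      rw [slice_toList s n (mem_lengths_nonneg hn)]
      exact List.take_prefix _ _
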